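-- pv_equiv track=rewrite | github.com/jonathangjertsen/waffle | waffle.py | get_linestyle_cycle
-- ===== SOURCE A (Python) =====
-- from typing import List, Dict, Tuple, Union, Iterator
--
-- LINESTYLE_PRIMARY_THRESHOLD = 25
--
-- LINESTYLE_SECONDARY_THRESHOLD = 50
--
-- LINESTYLE_FIRST_QUARTER = ":"
--
-- LINESTYLE_SECOND_QUARTER = "-."
--
-- LINESTYLE_THIRD_QUARTER = "--"
--
-- LINESTYLE_FOURTH_QUARTER = "-"
--
-- def get_linestyle_cycle(num_users: int) -> Iterator[str]:
--     """Generates linestyles in a way that is compatible with set_prop_cycle.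
--
--     It will yield more varied linestyles if there are many users.
--     """
--     for index in range(num_users):
--         if index < num_users // 4 and num_users > LINESTYLE_SECONDARY_THRESHOLD:
--             yield LINESTYLE_FIRST_QUARTER
--         elif index < num_users // 2 and num_users > LINESTYLE_PRIMARY_THRESHOLD:
--             yield LINESTYLE_SECOND_QUARTER
--         elif index < 3 * num_users // 4 and num_users > LINESTYLE_SECONDARY_THRESHOLD:
--             yield LINESTYLE_THIRD_QUARTER
--         else:
--             yield LINESTYLE_FOURTH_QUARTER
-- ===== SOURCE B (Python) =====
-- def get_linestyle_cycle(num_users):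
--     """Generates linestyles in a way that is compatible with set_prop_cycle.
--
--     It will yield more varied linestyles if there are many users.
--     """
--     # Paint-over algorithm: start with the default style everywhere, then
--     # overwrite regions layer by layer as thresholds are crossed.
--     styles = ["-"] * num_users
--     if num_users > 50:
--         styles[num_users // 2 : 3 * num_users // 4] = ["--"] * (3 * num_users // 4 - num_users // 2)
--     if num_users > 25:
--         styles[: num_users // 2] = ["-."] * (num_users // 2)
--     if num_users > 50:
--         styles[: num_users // 4] = [":"] * (num_users // 4)
--     yield from styles
-- ===== Notes on version B (the rewrite author's own statement) =====
-- stated objective: alternative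
-- what changed: B builds the whole list as the default style and then paints styles over slice regions in threshold layers (three bulk slice assignments, a constant-factor win over A's per-element condition chain), instead of classifying each index.
import Mathlib
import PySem

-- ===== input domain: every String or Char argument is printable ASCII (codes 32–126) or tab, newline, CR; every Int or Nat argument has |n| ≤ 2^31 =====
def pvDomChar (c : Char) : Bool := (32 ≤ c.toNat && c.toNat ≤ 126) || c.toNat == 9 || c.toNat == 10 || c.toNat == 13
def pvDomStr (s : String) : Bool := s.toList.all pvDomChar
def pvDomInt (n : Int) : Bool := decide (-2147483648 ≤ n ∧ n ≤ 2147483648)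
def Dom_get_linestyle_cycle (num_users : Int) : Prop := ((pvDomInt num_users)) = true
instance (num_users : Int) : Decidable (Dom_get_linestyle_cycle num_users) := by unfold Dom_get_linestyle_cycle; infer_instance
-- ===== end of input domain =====

-- B paints styles over slice regions in threshold layers instead of testing per-index conditions (alternative decomposition, same cost class).

-- ===== PORT A =====
-- literal port: for index in range(num_users), per-index branch chain
def get_linestyle_cycle (num_users : Int) : List String :=
  (PySem.List.pyRange 0 num_users 1).map (fun index =>
    if index < PySem.Int.floordiv num_users 4 ∧ num_users > 50 then ":"
    else if index < PySem.Int.floordiv num_users 2 ∧ num_users > 25 then "-."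
    else if index < PySem.Int.floordiv (3 * num_users) 4 ∧ num_users > 50 then "--"
    else "-")

-- ===== PORT B =====
-- Python slice assignment xs[a:b] = repl for 0 ≤ a ≤ b ≤ len xs (the only case B reaches,
-- since each assignment happens under num_users > 25): exact as take/drop splice.
def pySliceAssign (xs : List String) (a b : Int) (repl : List String) : List String :=
  xs.take a.toNat ++ repl ++ xs.drop b.toNat

def get_linestyle_cycle_alt (num_users : Int) : List String :=
  let styles := List.replicate num_users.toNat "-"
  let styles := if num_users > 50 then
      pySliceAssign styles (PySem.Int.floordiv num_users 2) (PySem.Int.floordiv (3 * num_users) 4)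
        (List.replicate (PySem.Int.floordiv (3 * num_users) 4 - PySem.Int.floordiv num_users 2).toNat "--")
    else styles
  let styles := if num_users > 25 then
      pySliceAssign styles 0 (PySem.Int.floordiv num_users 2)
        (List.replicate (PySem.Int.floordiv num_users 2).toNat "-.")
    else styles
  let styles := if num_users > 50 then
      pySliceAssign styles 0 (PySem.Int.floordiv num_users 4)
        (List.replicate (PySem.Int.floordiv num_users 4).toNat ":")
    else styles
  styles

-- ===== PRECONDITION & SPEC =====
def Spec_get_linestyle_cycle (num_users : Int) (out : List String) : Prop := out = get_linestyle_cycle_alt num_users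
instance (num_users : Int) (out : List String) : Decidable (Spec_get_linestyle_cycle num_users out) := by unfold Spec_get_linestyle_cycle; infer_instance

-- ===== CLAIM (what is proved, stated in full; the proofs are below) =====
def Claim_equal_get_linestyle_cycle : Prop := ∀ (num_users : Int), Dom_get_linestyle_cycle num_users → Spec_get_linestyle_cycle num_users (get_linestyle_cycle num_users)

-- ===== LEMMAS AND PROOFS =====

-- mapping a function constant on [a, b) over range(a, b) is a replicate
lemma map_const_on_pyRange (a b : Int) (f : Int → String) (c : String)
    (h : ∀ x, a ≤ x → x < b → f x = c) :
    (PySem.List.pyRange a b 1).map f = List.replicate (b - a).toNat c := by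
  rw [List.eq_replicate_iff]
  constructor
  · simp [PySem.List.length_pyRange_one]
  · intro s hs
    rcases List.mem_map.mp hs with ⟨x, hx, rfl⟩
    rcases (PySem.List.mem_pyRange_one).mp hx with ⟨h1, h2⟩
    exact h x h1 h2

-- ===== VERDICT (by name: the statement is the Claim_ definition above) =====
theorem get_linestyle_cycle_spec : Claim_equal_get_linestyle_cycle := by
  intro n _
  unfold Spec_get_linestyle_cycle get_linestyle_cycle get_linestyle_cycle_alt pySliceAssign
  have h4 : PySem.Int.floordiv n 4 = n / 4 := PySem.Int.floordiv_eq_ediv_of_pos (by omega)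
  have h2 : PySem.Int.floordiv n 2 = n / 2 := PySem.Int.floordiv_eq_ediv_of_pos (by omega)
  have h34 : PySem.Int.floordiv (3 * n) 4 = (3 * n) / 4 := PySem.Int.floordiv_eq_ediv_of_pos (by omega)
  rw [h4, h2, h34]
  by_cases hb : n > 50
  · -- A as four segments
    have hq1 : (0 : Int) ≤ n / 4 := by omega
    have hq12 : n / 4 ≤ n / 2 := by omega
    have hq23 : n / 2 ≤ (3 * n) / 4 := by omega
    have hq3n : (3 * n) / 4 ≤ n := by omega
    rw [PySem.List.pyRange_one_append 0 (n / 4) n hq1 (by omega),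
        PySem.List.pyRange_one_append (n / 4) (n / 2) n hq12 (by omega),
        PySem.List.pyRange_one_append (n / 2) ((3 * n) / 4) n hq23 hq3n]
    simp only [List.map_append]
    rw [map_const_on_pyRange 0 (n / 4) _ ":" (by
          intro x h1 h2; rw [if_pos ⟨h2, hb⟩]),
        map_const_on_pyRange (n / 4) (n / 2) _ "-." (by
          intro x h1 h2; rw [if_neg (by omega), if_pos (by omega)]),
        map_const_on_pyRange (n / 2) ((3 * n) / 4) _ "--" (by
          intro x h1 h2; rw [if_neg (by omega), if_neg (by omega), if_pos ⟨h2, hb⟩]),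
        map_const_on_pyRange ((3 * n) / 4) n _ "-" (by
          intro x h1 h2; rw [if_neg (by omega), if_neg (by omega), if_neg (by omega)])]
    -- B: evaluate the three paint-over layers
    simp only [if_pos hb, if_pos (show n > 25 by omega)]
    rw [List.take_replicate, List.drop_replicate]
    have e1 : min (n / 2).toNat n.toNat = (n / 2).toNat := by omega
    rw [e1]
    -- after layer 1: replicate (n/2) "-" ++ replicate (3n/4 - n/2) "--" ++ replicate (n - 3n/4) "-"
    rw [show List.take (0:Int).toNat
          (List.replicate (n / 2).toNat "-" ++ List.replicate ((3*n)/4 - n/2).toNat "--" ++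
           List.replicate (n.toNat - ((3*n)/4).toNat) "-") = [] by simp]
    rw [List.drop_append_of_le_length (by simp), List.drop_append_of_le_length (by simp),
        List.drop_replicate]
    have e2 : (n / 2).toNat - (n / 2).toNat = 0 := by omega
    rw [e2]
    simp only [List.replicate_zero, List.nil_append]
    -- after layer 2: replicate (n/2) "-." ++ replicate (3n/4 - n/2) "--" ++ replicate (n - 3n/4) "-"
    rw [show List.take (0:Int).toNat
          (List.replicate (n / 2).toNat "-." ++ (List.replicate ((3*n)/4 - n/2).toNat "--" ++
           List.replicate (n.toNat - ((3*n)/4).toNat) "-")) = [] by simp]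
    rw [List.drop_append_of_le_length (by simp; omega), List.drop_replicate]
    -- assemble: align the replicate counts
    simp only [List.nil_append]
    rw [show ((n / 2).toNat - (n / 4).toNat) = (n / 2 - n / 4).toNat from by omega,
        show (n.toNat - ((3 * n) / 4).toNat) = (n - 3 * n / 4).toNat from by omega,
        show (n / 4 - 0).toNat = (n / 4).toNat from by omega]
  · by_cases hp : n > 25
    · have hq1 : (0 : Int) ≤ n / 2 := by omega
      rw [PySem.List.pyRange_one_append 0 (n / 2) n hq1 (by omega)]
      simp only [List.map_append]
      rw [map_const_on_pyRange 0 (n / 2) _ "-." (by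
            intro x h1 h2; rw [if_neg (by omega), if_pos ⟨h2, hp⟩]),
          map_const_on_pyRange (n / 2) n _ "-" (by
            intro x h1 h2; rw [if_neg (by omega), if_neg (by omega), if_neg (by omega)])]
      simp only [if_neg hb, if_pos hp]
      rw [show List.take (0:Int).toNat (List.replicate n.toNat "-") = [] by simp,
          List.drop_replicate]
      simp only [List.nil_append]
      rw [show (n / 2 - 0).toNat = (n / 2).toNat from by omega,
          show (n.toNat - (n / 2).toNat) = (n - n / 2).toNat from by omega]
    · simp only [if_neg hb, if_neg hp]
      rw [map_const_on_pyRange 0 n _ "-" (by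
            intro x h1 h2; rw [if_neg (by omega), if_neg (by omega), if_neg (by omega)])]
      rw [show (n - 0).toNat = n.toNat from by omega]
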